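-- pv_equiv track=rewrite | github.com/mcggEz/microview-ai | mv-backend2-motor/motor_server.py | generate_scan_moves
-- ===== SOURCE A (Python) =====
-- def generate_scan_moves(sensitivity):
--     """Generate the list of relative (dx, dy) moves for samples 2-10.
--
--     Sample 1 is captured at the origin (no move needed), so we return 9 moves.
--     Each move distance = sensitivity.
--
--     Longitudinal strip (serpentine, 5 cols x 2 rows):
--         Start at top-right.
--         Row 1 (R->L): <-  <-  <-  <-       (samples 1-5, moving left)
--         Row 2 (L->R): v   ->  ->  ->  ->   (samples 6-10, serpentine back right)
--
--          5 << 4 << 3 << 2 << 1(start)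
--          v
--          6 >> 7 >> 8 >> 9 >> 10
--     """
--     S = sensitivity
--     moves = []
--     # Row 1: left 4 times (samples 2-5)
--     for _ in range(4):
--         moves.append((-S, 0))
--     # Down to row 2 (sample 6)
--     moves.append((0, S))
--     # Row 2: right 4 times, serpentine (samples 7-10)
--     for _ in range(4):
--         moves.append((S, 0))
--     return moves
-- ===== SOURCE B (Python) =====
-- def generate_scan_moves(sensitivity):
--     S = sensitivity
--     # absolute sample positions in serpentine order: row 0 leftwards, then row 1 rightwards
--     positions = [(-i * S, 0) for i in range(5)] + [(-(4 - i) * S, S) for i in range(5)]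
--     return [(x2 - x1, y2 - y1) for (x1, y1), (x2, y2) in zip(positions, positions[1:])]
-- ===== Notes on version B (the rewrite author's own statement) =====
-- stated objective: alternative
-- what changed: B builds the 10 absolute serpentine sample coordinates of the 5x2 grid and returns the 9 consecutive differences, instead of A's three explicit append blocks of literal deltas.
import Mathlib
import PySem

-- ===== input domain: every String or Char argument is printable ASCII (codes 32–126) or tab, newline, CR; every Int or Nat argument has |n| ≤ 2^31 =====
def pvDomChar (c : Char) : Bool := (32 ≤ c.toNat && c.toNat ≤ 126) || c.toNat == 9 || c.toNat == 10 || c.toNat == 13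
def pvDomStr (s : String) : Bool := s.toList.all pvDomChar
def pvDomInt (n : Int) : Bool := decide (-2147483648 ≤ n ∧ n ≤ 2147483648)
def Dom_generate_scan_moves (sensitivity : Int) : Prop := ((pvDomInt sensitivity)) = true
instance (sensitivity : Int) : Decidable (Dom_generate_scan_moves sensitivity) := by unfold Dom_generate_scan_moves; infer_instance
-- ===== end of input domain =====

-- ===== PORT A =====
-- literal port of A: append four (-S,0), then (0,S), then four (S,0)
def generate_scan_moves (sensitivity : Int) : List (Int × Int) :=
  let S := sensitivity
  let moves : List (Int × Int) := []
  let moves := (List.range 4).foldl (fun m _ => m ++ [(-S, 0)]) moves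
  let moves := moves ++ [(0, S)]
  let moves := (List.range 4).foldl (fun m _ => m ++ [(S, 0)]) moves
  moves

-- ===== PORT B =====
-- port of B: absolute serpentine coordinates, then consecutive differences
def generate_scan_moves_alt (sensitivity : Int) : List (Int × Int) :=
  let S := sensitivity
  let positions : List (Int × Int) :=
    (PySem.List.pyRange 0 5 1).map (fun i => (-i * S, 0))
      ++ (PySem.List.pyRange 0 5 1).map (fun i => (-(4 - i) * S, S))
  List.zipWith (fun p q => (q.1 - p.1, q.2 - p.2)) positions (positions.drop 1)

-- ===== PRECONDITION & SPEC =====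
def Spec_generate_scan_moves (sensitivity : Int) (out : List (Int × Int)) : Prop := out = generate_scan_moves_alt sensitivity
instance (sensitivity : Int) (out : List (Int × Int)) : Decidable (Spec_generate_scan_moves sensitivity out) := by unfold Spec_generate_scan_moves; infer_instance

-- ===== CLAIM (what is proved, stated in full; the proofs are below) =====
def Claim_equal_generate_scan_moves : Prop := ∀ (sensitivity : Int), Dom_generate_scan_moves sensitivity → Spec_generate_scan_moves sensitivity (generate_scan_moves sensitivity)

-- ===== LEMMAS AND PROOFS =====

-- ===== VERDICT (by name: the statement is the Claim_ definition above) =====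
theorem generate_scan_moves_spec : Claim_equal_generate_scan_moves := by
  intro S _
  unfold Spec_generate_scan_moves generate_scan_moves generate_scan_moves_alt
  simp [PySem.List.pyRange, List.range, List.range.loop]
  omega
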